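-- pv_equiv track=rewrite | github.com/Spy12150/Poker-Program-1 | server/app/game/hardcode_ai/ai_bladework_v2.py | count_backdoor_draws
-- ===== SOURCE A (Python) =====
-- def count_backdoor_draws(community, street):
--     """Count backdoor draw potential."""
--     if street != 'flop' or len(community) != 3:
--         return 0
--
--     backdoor_count = 0
--
--     # Backdoor flush draws (2 of same suit)
--     suits = [card[1] for card in community]
--     suit_counts = {}
--     for suit in suits:
--         suit_counts[suit] = suit_counts.get(suit, 0) + 1
--
--     for count in suit_counts.values():
--         if count == 2:
--             backdoor_count += 1
--
--     # Backdoor straight draws (simplified)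
--     rank_values = {'2': 2, '3': 3, '4': 4, '5': 5, '6': 6, '7': 7, '8': 8, '9': 9,
--                    'T': 10, 'J': 11, 'Q': 12, 'K': 13, 'A': 14}
--     values = sorted([rank_values[card[0]] for card in community])
--
--     # Check if there's potential for backdoor straights
--     if len(set(values)) >= 2 and max(values) - min(values) <= 8:
--         backdoor_count += 1
--
--     return min(backdoor_count, 2)
-- ===== SOURCE B (Python) =====
-- def count_backdoor_draws(community, street):
--     """Count backdoor draw potential (pairwise-comparison formulation)."""
--     if street != 'flop' or len(community) != 3:
--         return 0
--
--     rank_values = {'2': 2, '3': 3, '4': 4, '5': 5, '6': 6, '7': 7, '8': 8, '9': 9,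
--                    'T': 10, 'J': 11, 'Q': 12, 'K': 13, 'A': 14}
--
--     # One fused pass over the three unordered pairs of cards.
--     same_suit_pairs = 0
--     diff_rank = False
--     max_gap = 0
--     n = len(community)
--     for i in range(n):
--         for j in range(i + 1, n):
--             ci, cj = community[i], community[j]
--             if ci[1] == cj[1]:
--                 same_suit_pairs += 1
--             gap = abs(rank_values[ci[0]] - rank_values[cj[0]])
--             if gap > 0:
--                 diff_rank = True
--             if gap > max_gap:
--                 max_gap = gap
--
--     # Among 3 cards, one suit appears exactly twice iff exactly one pair shares a suit.
--     total = 1 if same_suit_pairs == 1 else 0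
--     # Some pair differs in rank iff >= 2 distinct values; the largest pairwise gap is max-min.
--     if diff_rank and max_gap <= 8:
--         total += 1
--     return total
-- ===== Notes on version B (the rewrite author's own statement) =====
-- stated objective: alternative
-- what changed: Replaces A's staged aggregation (suit-frequency dict + counting loop, sorted value list, set/min/max, final clamp) with one fused pass over the three unordered card pairs that counts same-suit pairs, detects any rank difference, and tracks the maximum pairwise rank gap; the flush bit is same_suit_pairs == 1 and the straight bit is diff_rank and max_gap <= 8, so no min(...,2) clamp is needed.
import Mathlib
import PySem

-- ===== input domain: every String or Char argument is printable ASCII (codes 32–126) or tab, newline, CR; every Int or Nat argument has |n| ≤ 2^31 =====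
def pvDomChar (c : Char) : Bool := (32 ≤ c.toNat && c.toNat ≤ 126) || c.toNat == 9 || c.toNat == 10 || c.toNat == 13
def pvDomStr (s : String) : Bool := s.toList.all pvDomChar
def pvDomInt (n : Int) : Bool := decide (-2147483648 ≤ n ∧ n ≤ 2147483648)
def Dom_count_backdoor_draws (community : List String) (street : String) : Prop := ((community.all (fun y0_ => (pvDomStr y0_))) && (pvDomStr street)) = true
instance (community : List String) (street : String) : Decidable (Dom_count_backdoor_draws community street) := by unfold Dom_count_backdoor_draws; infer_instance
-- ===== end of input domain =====

-- B replaces A's staged aggregation (suit-frequency dict + counting loop, sorted value list,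
-- set/min/max, final clamp) by one fused pass over the three unordered card pairs: alternative decomposition, same cost.


-- ===== PORT A =====
-- the rank_values dict literal (shared data constant)
def rankValues : PySem.Dict Char Int :=
  PySem.Dict.ofList [('2',2),('3',3),('4',4),('5',5),('6',6),('7',7),('8',8),('9',9),
                     ('T',10),('J',11),('Q',12),('K',13),('A',14)]

def count_backdoor_draws (community : List String) (street : String) : Int :=
  if street ≠ "flop" ∨ community.length ≠ 3 then 0
  else
    -- suits = [card[1] for card in community]  (total form via getD; Pre_ excludes the IndexError)
    let suits := community.map (fun card => (PySem.Str.pyGet? card 1).getD ' ')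
    let suit_counts : PySem.Dict Char Int :=
      suits.foldl (fun d suit => PySem.Dict.insert d suit (PySem.Dict.getD d suit 0 + 1)) PySem.Dict.empty
    let bd1 : Int := (PySem.Dict.values suit_counts).foldl (fun acc cnt => if cnt = 2 then acc + 1 else acc) 0
    -- values = sorted([rank_values[card[0]] for card in community])  (getD 0; Pre_ excludes the KeyError)
    let values := PySem.List.sorted (community.map (fun card => PySem.Dict.getD rankValues ((PySem.Str.pyGet? card 0).getD ' ') 0)) (fun v => v) false
    let bd2 : Int :=
      if (PySem.Set.ofList values).length ≥ 2 ∧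
         (PySem.List.max? values (fun v => v)).getD 0 - (PySem.List.min? values (fun v => v)).getD 0 ≤ 8
      then bd1 + 1 else bd1
    min bd2 2

-- ===== PORT B =====
def count_backdoor_draws_alt (community : List String) (street : String) : Int :=
  if street ≠ "flop" ∨ community.length ≠ 3 then 0
  else
    -- one fused pass over the unordered pairs:  for i in range(n): for j in range(i+1, n): ...
    let n : Int := community.length
    let st : Int × Bool × Int :=
      (PySem.List.pyRange 0 n 1).foldl (fun s i =>
        (PySem.List.pyRange (i+1) n 1).foldl (fun (s : Int × Bool × Int) j =>
          let ci := (PySem.List.pyGet? community i).getD ""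
          let cj := (PySem.List.pyGet? community j).getD ""
          let ssp := if (PySem.Str.pyGet? ci 1).getD ' ' = (PySem.Str.pyGet? cj 1).getD ' '
                     then s.1 + 1 else s.1
          let gap := |PySem.Dict.getD rankValues ((PySem.Str.pyGet? ci 0).getD ' ') 0 -
                      PySem.Dict.getD rankValues ((PySem.Str.pyGet? cj 0).getD ' ') 0|
          let dr := if gap > 0 then true else s.2.1
          let mg := if gap > s.2.2 then gap else s.2.2
          (ssp, dr, mg)) s) (0, false, 0)
    let total : Int := if st.1 = 1 then 1 else 0
    if st.2.1 = true ∧ st.2.2 ≤ 8 then total + 1 else total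

-- ===== PRECONDITION & SPEC =====
-- Pre_ excludes exactly the inputs where A raises: on the flop with 3 community cards, a card
-- shorter than 2 characters (IndexError at card[1]) or whose first character is not a valid
-- rank (KeyError in rank_values).
def Pre_count_backdoor_draws (community : List String) (street : String) : Prop :=
  street = "flop" ∧ community.length = 3 →
    ∀ card ∈ community, 2 ≤ card.toList.length ∧
      card.toList.getD 0 ' ' ∈ ['2','3','4','5','6','7','8','9','T','J','Q','K','A']
instance (community : List String) (street : String) : Decidable (Pre_count_backdoor_draws community street) := by unfold Pre_count_backdoor_draws; infer_instance

def pvWitness_count_backdoor_draws : List String × String := (["Ah", "Kh", "2d"], "flop")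

def Spec_count_backdoor_draws (community : List String) (street : String) (out : Int) : Prop := out = count_backdoor_draws_alt community street
instance (community : List String) (street : String) (out : Int) : Decidable (Spec_count_backdoor_draws community street out) := by unfold Spec_count_backdoor_draws; infer_instance

-- ===== CLAIM (what is proved, stated in full; the proofs are below) =====
def Claim_equal_count_backdoor_draws : Prop := ∀ (community : List String) (street : String), Dom_count_backdoor_draws community street → Pre_count_backdoor_draws community street → Spec_count_backdoor_draws community street (count_backdoor_draws community street)

-- ===== LEMMAS AND PROOFS =====

-- flush part: A's count-of-suits-seen-twice loop over 3 cards equals B's one-same-suit-pair test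
theorem flush_eq (s1 s2 s3 : Char) :
    ((PySem.Dict.values (([s1,s2,s3]).foldl
        (fun d suit => PySem.Dict.insert d suit (PySem.Dict.getD d suit 0 + 1)) PySem.Dict.empty)).foldl
      (fun acc cnt => if cnt = (2:Int) then acc + 1 else acc) 0)
    = if (((if s1 = s2 then (1:Int) else 0) + (if s1 = s3 then 1 else 0)) + (if s2 = s3 then 1 else 0)) = 1
      then (1:Int) else 0 := by
  by_cases h12 : s1 = s2 <;> by_cases h13 : s1 = s3 <;> by_cases h23 : s2 = s3 <;>
    simp_all [PySem.Dict.insert, PySem.Dict.getD, PySem.Dict.get?, PySem.Dict.empty,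
      PySem.Dict.values, List.foldl, beq_iff_eq]

def rankInts : List Int := [2,3,4,5,6,7,8,9,10,11,12,13,14]

-- straight part: A's sorted/set/min-max test iff B's some-pair-differs ∧ every-pairwise-gap ≤ 8
theorem straight_eq : ∀ v1 ∈ rankInts, ∀ v2 ∈ rankInts, ∀ v3 ∈ rankInts,
    ((PySem.Set.ofList (PySem.List.sorted [v1,v2,v3] (fun v => v) false)).length ≥ 2 ∧
      (PySem.List.max? (PySem.List.sorted [v1,v2,v3] (fun v => v) false) (fun v => v)).getD 0 -
        (PySem.List.min? (PySem.List.sorted [v1,v2,v3] (fun v => v) false) (fun v => v)).getD 0 ≤ 8)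
    ↔ ((0 < |v1 - v2| ∨ 0 < |v1 - v3| ∨ 0 < |v2 - v3|) ∧
        |v1 - v2| ≤ 8 ∧ |v1 - v3| ≤ 8 ∧ |v2 - v3| ≤ 8) := by
  decide

theorem rank_mem (ch : Char)
    (h : ch ∈ ['2','3','4','5','6','7','8','9','T','J','Q','K','A']) :
    PySem.Dict.getD rankValues ch 0 ∈ rankInts := by
  fin_cases h <;> decide

theorem str_get0 (s : String) : (PySem.Str.pyGet? s 0).getD ' ' = s.toList.getD 0 ' ' := by
  simp [PySem.Str.pyGet?, PySem.List.pyGet?_zero, List.getD]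

-- a Bool-ite chain equals true iff some condition holds (B's diff_rank flag)
theorem bool_or (c1 c2 c3 : Prop) [Decidable c1] [Decidable c2] [Decidable c3] :
    ((if c3 then true else if c2 then true else if c1 then true else false) = true) = (c3 ∨ c2 ∨ c1) := by
  split_ifs <;> simp [*]

-- B's nested same-suit-pair accumulation equals the flat 0/1 sum
theorem ssp_flat (P12 P13 P23 : Prop) [Decidable P12] [Decidable P13] [Decidable P23] :
    (if P23 then (if P13 then (if P12 then (0:Int)+1 else 0)+1 else if P12 then 0+1 else 0)+1
     else if P13 then (if P12 then (0:Int)+1 else 0)+1 else if P12 then 0+1 else 0)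
    = ((if P12 then (1:Int) else 0) + (if P13 then 1 else 0)) + (if P23 then 1 else 0) := by
  split_ifs <;> norm_num

-- B's unrolled pair loop (diff_rank flag and running-max gap) in canonical form
theorem fuse (P12 P13 P23 : Prop) [Decidable P12] [Decidable P13] [Decidable P23] (x12 x13 x23 : Int) :
  (if (if |x23| > 0 then true else if |x13| > 0 then true else if |x12| > 0 then true else false) = true ∧
      (if |x23| > (if |x13| > (if |x12| > 0 then |x12| else 0) then |x13| else if |x12| > 0 then |x12| else 0) then |x23|
       else if |x13| > (if |x12| > 0 then |x12| else 0) then |x13| else if |x12| > 0 then |x12| else 0) ≤ 8 then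
    (if (if P23 then (if P13 then (if P12 then (0:Int)+1 else 0)+1 else if P12 then 0+1 else 0)+1
         else if P13 then (if P12 then (0:Int)+1 else 0)+1 else if P12 then 0+1 else 0) = 1 then (1:Int) else 0) + 1
  else
    (if (if P23 then (if P13 then (if P12 then (0:Int)+1 else 0)+1 else if P12 then 0+1 else 0)+1
         else if P13 then (if P12 then (0:Int)+1 else 0)+1 else if P12 then 0+1 else 0) = 1 then (1:Int) else 0))
  =
  (if (0 < |x12| ∨ 0 < |x13| ∨ 0 < |x23|) ∧ |x12| ≤ 8 ∧ |x13| ≤ 8 ∧ |x23| ≤ 8 then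
    (if ((if P12 then (1:Int) else 0) + (if P13 then 1 else 0)) + (if P23 then 1 else 0) = 1 then (1:Int) else 0) + 1
  else (if ((if P12 then (1:Int) else 0) + (if P13 then 1 else 0)) + (if P23 then 1 else 0) = 1 then (1:Int) else 0)) := by
  have h12 := abs_nonneg x12
  have h13 := abs_nonneg x13
  have h23 := abs_nonneg x23
  simp only [bool_or]
  simp only [ssp_flat]
  generalize |x12| = g12 at *
  generalize |x13| = g13 at *
  generalize |x23| = g23 at *
  refine if_congr ?_ rfl rfl
  constructor
  · rintro ⟨h1, h2⟩
    split_ifs at h2 <;> exact ⟨by tauto, by omega, by omega, by omega⟩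
  · rintro ⟨h1, h2, h3, h4⟩
    exact ⟨by tauto, by split_ifs <;> omega⟩

-- B's fused pair loop evaluated on a 3-card flop
theorem alt_eval (a b c : String) :
    count_backdoor_draws_alt [a,b,c] "flop" =
      (if (0 < |rankValues.getD ((PySem.Str.pyGet? a 0).getD ' ') 0 - rankValues.getD ((PySem.Str.pyGet? b 0).getD ' ') 0| ∨
           0 < |rankValues.getD ((PySem.Str.pyGet? a 0).getD ' ') 0 - rankValues.getD ((PySem.Str.pyGet? c 0).getD ' ') 0| ∨
           0 < |rankValues.getD ((PySem.Str.pyGet? b 0).getD ' ') 0 - rankValues.getD ((PySem.Str.pyGet? c 0).getD ' ') 0|) ∧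
          |rankValues.getD ((PySem.Str.pyGet? a 0).getD ' ') 0 - rankValues.getD ((PySem.Str.pyGet? b 0).getD ' ') 0| ≤ 8 ∧
          |rankValues.getD ((PySem.Str.pyGet? a 0).getD ' ') 0 - rankValues.getD ((PySem.Str.pyGet? c 0).getD ' ') 0| ≤ 8 ∧
          |rankValues.getD ((PySem.Str.pyGet? b 0).getD ' ') 0 - rankValues.getD ((PySem.Str.pyGet? c 0).getD ' ') 0| ≤ 8 then
        (if ((if (PySem.Str.pyGet? a 1).getD ' ' = (PySem.Str.pyGet? b 1).getD ' ' then (1:Int) else 0) +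
             (if (PySem.Str.pyGet? a 1).getD ' ' = (PySem.Str.pyGet? c 1).getD ' ' then 1 else 0)) +
             (if (PySem.Str.pyGet? b 1).getD ' ' = (PySem.Str.pyGet? c 1).getD ' ' then 1 else 0) = 1
         then (1:Int) else 0) + 1
      else
        (if ((if (PySem.Str.pyGet? a 1).getD ' ' = (PySem.Str.pyGet? b 1).getD ' ' then (1:Int) else 0) +
             (if (PySem.Str.pyGet? a 1).getD ' ' = (PySem.Str.pyGet? c 1).getD ' ' then 1 else 0)) +
             (if (PySem.Str.pyGet? b 1).getD ' ' = (PySem.Str.pyGet? c 1).getD ' ' then 1 else 0) = 1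
         then (1:Int) else 0)) := by
  unfold count_backdoor_draws_alt
  rw [if_neg (by simp)]
  have r0 : PySem.List.pyRange 0 3 1 = [0,1,2] := by decide
  have r1 : PySem.List.pyRange (0+1) 3 1 = [1,2] := by decide
  have r2 : PySem.List.pyRange (1+1) 3 1 = [2] := by decide
  have r3 : PySem.List.pyRange (2+1) 3 1 = [] := by decide
  simp only [List.length_cons, List.length_nil]
  simp only [show ((0+1+1+1 : Nat) : Int) = 3 from by norm_num]
  have g0 : (PySem.List.pyGet? [a,b,c] 0).getD "" = a := by simp [PySem.List.pyGet?, PySem.List.pyIdx?]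
  have g1 : (PySem.List.pyGet? [a,b,c] 1).getD "" = b := by simp [PySem.List.pyGet?, PySem.List.pyIdx?]
  have g2 : (PySem.List.pyGet? [a,b,c] 2).getD "" = c := by simp [PySem.List.pyGet?, PySem.List.pyIdx?]
  simp only [r0, r1, r2, r3, List.foldl, g0, g1, g2]
  exact fuse _ _ _
    (rankValues.getD ((PySem.Str.pyGet? a 0).getD ' ') 0 - rankValues.getD ((PySem.Str.pyGet? b 0).getD ' ') 0)
    (rankValues.getD ((PySem.Str.pyGet? a 0).getD ' ') 0 - rankValues.getD ((PySem.Str.pyGet? c 0).getD ' ') 0)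
    (rankValues.getD ((PySem.Str.pyGet? b 0).getD ' ') 0 - rankValues.getD ((PySem.Str.pyGet? c 0).getD ' ') 0)

-- ===== VERDICT (by name: the statement is the Claim_ definition above) =====
theorem count_backdoor_draws_spec : Claim_equal_count_backdoor_draws := by
  intro community street _ hpre
  unfold Spec_count_backdoor_draws
  by_cases hg : street ≠ "flop" ∨ community.length ≠ 3
  · unfold count_backdoor_draws count_backdoor_draws_alt
    simp only [if_pos hg]
  · rw [not_or, not_not, not_not] at hg
    obtain ⟨hs, hl⟩ := hg
    obtain ⟨a, b, c, rfl⟩ := List.length_eq_three.mp hl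
    subst hs
    have hp := hpre ⟨rfl, hl⟩
    have hva := rank_mem _ ((str_get0 a) ▸ (hp a (by simp)).2)
    have hvb := rank_mem _ ((str_get0 b) ▸ (hp b (by simp)).2)
    have hvc := rank_mem _ ((str_get0 c) ▸ (hp c (by simp)).2)
    rw [alt_eval]
    unfold count_backdoor_draws
    rw [if_neg (by simp)]
    simp only [List.map_cons, List.map_nil]
    rw [flush_eq]
    have hiff := straight_eq _ hva _ hvb _ hvc
    split_ifs <;> omega
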